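-- pv_equiv track=rewrite | github.com/linshiyx/lycan2 | app/lycan_biz.py | count_vote
-- ===== SOURCE A (Python) =====
-- def count_vote(vote_list):
--     from collections import Counter
--     c = Counter()
--     for name in vote_list:
--         if vote_list[name]:
--             c[vote_list[name]] += 1
--     max_vote_num = 0
--     for name in vote_list:
--         if max_vote_num < c[name]:
--             max_vote_num = c[name]
--     same_vote = []
--     for name in vote_list:
--         if max_vote_num == c[name]:
--             same_vote.append(name)
--     if len(same_vote) == 1:
--         return same_vote[0]
--     else:
--         return ''
-- ===== SOURCE B (Python) =====
-- def count_vote(vote_list):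
--     from collections import Counter
--     counts = Counter(v for v in vote_list.values() if v)
--     ordered = sorted(vote_list, key=lambda n: counts[n], reverse=True)
--     if not ordered:
--         return ''
--     if len(ordered) == 1:
--         return ordered[0]
--     return ordered[0] if counts[ordered[1]] < counts[ordered[0]] else ''
-- ===== Notes on version B (the rewrite author's own statement) =====
-- stated objective: alternative
-- what changed: Replaces A's three per-key passes (count, max-scan, tie-collection) by one Counter construction plus a single descending sort of the keys by count, deciding from the top two keys whether the leader is unique.
import Mathlib
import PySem

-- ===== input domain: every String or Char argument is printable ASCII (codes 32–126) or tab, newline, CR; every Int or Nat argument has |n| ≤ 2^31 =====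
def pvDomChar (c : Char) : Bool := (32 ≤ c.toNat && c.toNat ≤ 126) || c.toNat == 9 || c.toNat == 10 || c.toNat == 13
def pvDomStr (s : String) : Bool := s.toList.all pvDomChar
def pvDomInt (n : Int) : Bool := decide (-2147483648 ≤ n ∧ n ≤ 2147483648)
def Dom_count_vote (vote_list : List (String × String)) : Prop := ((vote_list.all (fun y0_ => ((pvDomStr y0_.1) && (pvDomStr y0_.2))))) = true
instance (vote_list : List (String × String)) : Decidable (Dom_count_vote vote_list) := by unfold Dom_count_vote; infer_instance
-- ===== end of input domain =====

-- B replaces A's three passes (count, max-scan, tie-collection) by one Counter plus a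
-- single descending sort of the keys by count, deciding uniqueness from the top two keys.
-- ===== PORT A =====
-- A is written over a dict (keys = voters, values = votes); the assoc list goes through
-- PySem.Dict.ofList first, exactly as Python builds the dict.
def count_vote (vote_list : List (String × String)) : String :=
  let d := PySem.Dict.ofList vote_list
  -- for name in vote_list: if vote_list[name]: c[vote_list[name]] += 1
  let c := d.keys.foldl (fun c name =>
      if d.getD name "" ≠ "" then c.modify (d.getD name "") (0 : Int) (· + 1) else c)
    (PySem.Dict.empty : PySem.Dict String Int)
  -- for name in vote_list: if max_vote_num < c[name]: max_vote_num = c[name]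
  let maxVoteNum := d.keys.foldl
    (fun m name => if m < c.getD name 0 then c.getD name 0 else m) (0 : Int)
  -- for name in vote_list: if max_vote_num == c[name]: same_vote.append(name)
  let sameVote := d.keys.foldl
    (fun acc name => if maxVoteNum = c.getD name 0 then acc ++ [name] else acc) ([] : List String)
  -- same_vote[0] is guarded by len(same_vote) == 1, so the index is always in range
  if sameVote.length = 1 then PySem.List.pyGetD sameVote 0 "" else ""

-- ===== PORT B =====
def count_vote_alt (vote_list : List (String × String)) : String :=
  let d := PySem.Dict.ofList vote_list
  let counts := PySem.Dict.counter (d.values.filter (fun v => v ≠ ""))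
  let ordered := PySem.List.sorted d.keys (fun n => counts.getD n 0) true
  match ordered with
  | [] => ""
  | [x] => x
  | x :: y :: _ => if counts.getD y 0 < counts.getD x 0 then x else ""

-- ===== PRECONDITION & SPEC =====
def Spec_count_vote (vote_list : List (String × String)) (out : String) : Prop := out = count_vote_alt vote_list
instance (vote_list : List (String × String)) (out : String) : Decidable (Spec_count_vote vote_list out) := by unfold Spec_count_vote; infer_instance

-- ===== CLAIM (what is proved, stated in full; the proofs are below) =====
def Claim_equal_count_vote : Prop := ∀ (vote_list : List (String × String)), Dom_count_vote vote_list → Spec_count_vote vote_list (count_vote vote_list)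

-- ===== LEMMAS AND PROOFS =====

lemma foldl_max_le (l : List String) (f : String → Int) (c init : Int) (h0 : init ≤ c)
    (h : ∀ x ∈ l, f x ≤ c) : l.foldl (fun m x => max m (f x)) init ≤ c := by
  induction l generalizing init with
  | nil => exact h0
  | cons a t ih =>
    exact ih _ (max_le h0 (h a (by simp))) (fun x hx => h x (List.mem_cons_of_mem _ hx))

-- step 1: counting dicts agree
lemma counts_eq (d : PySem.Dict String String) (hnd : d.keys.Nodup) :
    d.keys.foldl (fun c name =>
      if d.getD name "" ≠ "" then c.modify (d.getD name "") (0 : Int) (· + 1) else c)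
      (PySem.Dict.empty : PySem.Dict String Int)
    = PySem.Dict.counter (d.values.filter (fun v => v ≠ "")) := by
  rw [PySem.Dict.values_eq_map_keys d hnd "", List.filter_map,
      PySem.Dict.counter_eq_foldl, List.foldl_map,
      PySem.List.foldl_ite_eq_foldl_filter (p := fun name => d.getD name "" ≠ "")]
  rfl

theorem main (keys : List String) (g : String → Int) (hnd : keys.Nodup) (hg : ∀ n, 0 ≤ g n) :
    (let M := keys.foldl (fun m name => if m < g name then g name else m) (0 : Int);
     let sameVote := keys.foldl
       (fun acc name => if M = g name then acc ++ [name] else acc) ([] : List String);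
     if sameVote.length = 1 then PySem.List.pyGetD sameVote 0 "" else "")
    = (match PySem.List.sorted keys g true with
       | [] => ""
       | [x] => x
       | x :: y :: _ => if g y < g x then x else "") := by
  have hiteq : (fun (m : Int) n => if m < g n then g n else m) = fun m n => max m (g n) := by
    funext m n
    by_cases h : m < g n <;> by_cases h2 : m ≤ g n <;> simp [max_def, h, h2] <;> omega
  simp only [hiteq, PySem.List.foldl_append_ite_eq_filter, List.nil_append]
  set M := keys.foldl (fun m n => max m (g n)) 0 with hM
  have hub : ∀ n ∈ keys, g n ≤ M := (PySem.List.le_foldl_max_int keys g 0).2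
  rcases hs : PySem.List.sorted keys g true with _ | ⟨x, _ | ⟨y, t⟩⟩
  · have hk : keys = [] := (PySem.List.sorted_eq_nil_iff keys g true).mp hs
    subst hk; simp
  · have hperm := PySem.List.sorted_perm keys g true
    rw [hs] at hperm
    have hk : keys = [x] := ((List.singleton_perm).mp hperm).symm
    subst hk
    have hMx : M = g x := by simp [hM, max_eq_right (hg x)]
    simp [hMx, PySem.List.pyGetD]
  · have hperm := PySem.List.sorted_perm keys g true
    rw [hs] at hperm
    have hx : x ∈ keys := hperm.mem_iff.mp (by simp)
    have hy : y ∈ keys := hperm.mem_iff.mp (by simp)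
    have hnodup_ord : (x :: y :: t).Nodup := (hperm.nodup_iff).mpr hnd
    have hxy : x ≠ y := by
      intro h; exact (List.nodup_cons.mp hnodup_ord).1 (by simp [h])
    have hhead : ∀ n ∈ keys, g n ≤ g x := PySem.List.key_head_sorted_rev_ge keys g hs
    have hMx : M = g x := le_antisymm (foldl_max_le keys g (g x) 0 (hg x) hhead) (hub x hx)
    have hpw := PySem.List.sorted_pairwise_rev keys g
    rw [hs] at hpw
    have hyall : ∀ b ∈ t, g b ≤ g y := (List.pairwise_cons.mp (List.pairwise_cons.mp hpw).2).1
    by_cases hlt : g y < g x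
    · have hpred : ∀ n ∈ keys, (decide (M = g n)) = (n == x) := by
        intro n hn
        by_cases hnx : n = x
        · simp [hnx, hMx]
        · have hn' : n ∈ y :: t := by
            rcases List.mem_cons.mp (hperm.mem_iff.mpr hn) with h | h
            · exact absurd h hnx
            · exact h
          have hlt' : g n < g x := by
            rcases List.mem_cons.mp hn' with rfl | h
            · exact hlt
            · exact lt_of_le_of_lt (hyall _ h) hlt
          have : M ≠ g n := by omega
          simp [hnx, this]
      rw [List.filter_congr hpred, List.filter_beq]
      have hc : keys.count x = 1 := List.count_eq_one_of_mem hnd hx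
      simp [hc, hlt, PySem.List.pyGetD]
    · have hyx : g y = g x := le_antisymm ((List.pairwise_cons.mp hpw).1 y (by simp)) (by omega)
      have hxf : x ∈ keys.filter (fun n => decide (M = g n)) := by
        simp [List.mem_filter, hx, hMx]
      have hyf : y ∈ keys.filter (fun n => decide (M = g n)) := by
        simp [List.mem_filter, hy, hMx, hyx]
      show _ = (if g y < g x then x else "")
      rw [if_neg hlt, if_neg]
      intro hlen
      rcases List.length_eq_one_iff.mp hlen with ⟨z, hz⟩
      rw [hz] at hxf hyf
      simp at hxf hyf
      exact hxy (hxf.trans hyf.symm)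

-- ===== VERDICT (by name: the statement is the Claim_ definition above) =====
theorem count_vote_spec : Claim_equal_count_vote := by
  intro vl _
  unfold Spec_count_vote
  simp only [count_vote, count_vote_alt]
  rw [counts_eq _ (PySem.Dict.nodup_keys_ofList _)]
  exact main _ _ (PySem.Dict.nodup_keys_ofList _)
    (fun n => by simp [PySem.Dict.getD_counter])
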